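-- pv_equiv track=rewrite | github.com/ShashiPar/pythonLab1 | revNum.py | find_sum_and_reverse
-- ===== SOURCE A (Python) =====
-- def find_sum_and_reverse(number):
--   sum_of_digits = 0
--   reverse = 0
--   temp = number
--
--   while temp > 0:
--     digit = temp % 10
--     sum_of_digits += digit
--     reverse = reverse * 10 + digit
--     temp //= 10
--
--   return sum_of_digits, reverse
-- ===== SOURCE B (Python) =====
-- def find_sum_and_reverse(number):
--     if number <= 0:
--         return 0, 0
--     total = 0
--     reverse = 0
--     place = 1
--     for c in str(number):
--         d = int(c)
--         total += d
--         reverse += d * place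
--         place *= 10
--     return total, reverse
-- ===== Notes on version B (the rewrite author's own statement) =====
-- stated objective: alternative
-- what changed: Replaces A's arithmetic digit extraction (repeated %10 and //10 on the integer, LSB-first, reverse built as r*10+d) with a single forward pass over str(number): each character is converted back to a digit and the reversed number is accumulated with an explicit place-value multiplier.
import Mathlib
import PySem

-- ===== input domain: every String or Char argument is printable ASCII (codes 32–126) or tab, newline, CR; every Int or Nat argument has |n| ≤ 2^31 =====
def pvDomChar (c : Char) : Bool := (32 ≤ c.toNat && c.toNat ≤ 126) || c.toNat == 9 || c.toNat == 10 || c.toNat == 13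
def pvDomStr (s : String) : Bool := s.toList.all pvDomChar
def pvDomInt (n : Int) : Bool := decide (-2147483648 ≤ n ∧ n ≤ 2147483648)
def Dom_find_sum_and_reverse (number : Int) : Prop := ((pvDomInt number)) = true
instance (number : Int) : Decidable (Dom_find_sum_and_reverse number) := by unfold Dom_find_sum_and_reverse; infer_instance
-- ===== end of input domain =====

-- B replaces A's %10 // 10 digit-extraction loop with one forward pass over str(number)
-- using a place-value accumulator (objective: alternative; same asymptotic cost).


-- ===== PORT A =====
-- the while loop: state (temp, sum_of_digits, reverse), updated exactly as in A
def pvLoopA (temp s r : Int) : Int × Int :=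
  if 0 < temp then
    pvLoopA (PySem.Int.floordiv temp 10) (s + PySem.Int.mod temp 10)
      (r * 10 + PySem.Int.mod temp 10)
  else (s, r)
termination_by temp.toNat
decreasing_by
  have h10 : PySem.Int.floordiv temp 10 = temp / 10 := PySem.Int.floordiv_eq_ediv_of_pos (by omega)
  rw [h10]; omega

def find_sum_and_reverse (number : Int) : Int × Int := pvLoopA number 0 0

-- ===== PORT B =====
-- one iteration of B's for-loop: state (total, reverse, place); d = int(c)
-- (int(c) never raises here: every char of str(number) for number > 0 is a digit, so getD 0 is never taken)
def pvStepB (st : Int × Int × Int) (c : Char) : Int × Int × Int :=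
  let d := (PySem.Int.ofChars? [c]).getD 0
  (st.1 + d, st.2.1 + d * st.2.2, st.2.2 * 10)

def find_sum_and_reverse_alt (number : Int) : Int × Int :=
  if number ≤ 0 then (0, 0)
  else
    -- str(number); PySem.Int.toChars = (toStr number).toList (toList_toStr)
    let st := (PySem.Int.toChars number).foldl pvStepB (0, 0, 1)
    (st.1, st.2.1)

-- ===== PRECONDITION & SPEC =====
def Spec_find_sum_and_reverse (number : Int) (out : Int × Int) : Prop := out = find_sum_and_reverse_alt number
instance (number : Int) (out : Int × Int) : Decidable (Spec_find_sum_and_reverse number out) := by unfold Spec_find_sum_and_reverse; infer_instance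

-- ===== CLAIM (what is proved, stated in full; the proofs are below) =====
def Claim_equal_find_sum_and_reverse : Prop := ∀ (number : Int), Dom_find_sum_and_reverse number → Spec_find_sum_and_reverse number (find_sum_and_reverse number)

-- ===== LEMMAS AND PROOFS =====

-- int(str of a single decimal digit) is that digit
lemma ofChars?_digitChar (d : Nat) (hd : d < 10) :
    ((PySem.Int.ofChars? [Nat.digitChar d]).getD 0) = (d : Int) := by
  interval_cases d <;> decide

-- B's fold over the decimal digits of a positive m, as a function of m
lemma foldl_toDigits (m : Nat) (hm : 0 < m) :
    ∀ s r : Int,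
      pvLoopA (m : Int) s r =
        (s + ((Nat.toDigits 10 m).foldl pvStepB (0, 0, 1)).1,
         r * ((Nat.toDigits 10 m).foldl pvStepB (0, 0, 1)).2.2
           + ((Nat.toDigits 10 m).foldl pvStepB (0, 0, 1)).2.1) := by
  induction m using Nat.strong_induction_on with
  | _ m ih =>
    intro s r
    rw [pvLoopA]
    have hpos : (0 : Int) < (m : Int) := by exact_mod_cast hm
    rw [if_pos hpos]
    have hdiv : PySem.Int.floordiv (m : Int) 10 = ((m / 10 : Nat) : Int) := by
      exact_mod_cast PySem.Int.floordiv_natCast m 10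
    have hmod : PySem.Int.mod (m : Int) 10 = ((m % 10 : Nat) : Int) := by
      exact_mod_cast PySem.Int.mod_natCast m 10
    rw [hdiv, hmod]
    by_cases hlt : m < 10
    · -- last digit: m // 10 == 0, the loop stops; toDigits 10 m = [digitChar m]
      have hq : m / 10 = 0 := Nat.div_eq_of_lt hlt
      have hm0 : m % 10 = m := Nat.mod_eq_of_lt hlt
      rw [hq, hm0, pvLoopA, if_neg (by omega)]
      rw [Nat.toDigits_of_lt_base hlt]
      simp [pvStepB, ofChars?_digitChar m hlt]
      try ring
    · -- m ≥ 10: toDigits 10 m = toDigits 10 (m/10) ++ [digitChar (m%10)]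
      have hge : 10 ≤ m := by omega
      have hq : 0 < m / 10 := Nat.div_pos hge (by norm_num)
      rw [ih (m / 10) (Nat.div_lt_self hm (by norm_num)) hq]
      rw [Nat.toDigits_of_base_le (by norm_num) hge, List.foldl_append]
      have hd : m % 10 < 10 := Nat.mod_lt _ (by norm_num)
      simp only [List.foldl_cons, List.foldl_nil]
      simp [pvStepB, ofChars?_digitChar (m % 10) hd, Prod.ext_iff]
      constructor <;> ring

-- ===== VERDICT (by name: the statement is the Claim_ definition above) =====
theorem find_sum_and_reverse_spec : Claim_equal_find_sum_and_reverse := by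
  intro number _
  unfold Spec_find_sum_and_reverse find_sum_and_reverse find_sum_and_reverse_alt
  by_cases h : number ≤ 0
  · rw [pvLoopA, if_neg (by omega), if_pos h]
  · rw [if_neg h]
    have hpos : 0 < number := by omega
    have hm : number = ((number.toNat : Nat) : Int) := by omega
    have htn : 0 < number.toNat := by omega
    have hch : PySem.Int.toChars number = Nat.toDigits 10 number.toNat := by
      simp [PySem.Int.toChars, not_lt.mpr (le_of_lt hpos)]
    rw [hch]
    rw [hm, foldl_toDigits number.toNat htn 0 0]
    simp only [zero_add, zero_mul, Int.toNat_natCast]
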